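-- pv_equiv track=rewrite | github.com/jaydeelew/leet_python311 | Backtracking/Permutations2.py | letter_combos
-- ===== SOURCE A (Python) =====
-- def letter_combos(letters: list[str], k: int) -> list[list[str]]:
--     def backtrack(curr_path):
--         if len(curr_path) == k:
--             ans.append(curr_path.copy())
--             return
--
--         for ltr in letters:
--             if ltr not in curr_path:
--                 curr_path.append(ltr)
--                 backtrack(curr_path)
--                 curr_path.pop()
--
--     ans = []
--     backtrack([])
--     return ans
-- ===== SOURCE B (Python) =====
-- def letter_combos(letters: list[str], k: int) -> list[list[str]]:
--     if k < 0:
--         return []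
--     paths = [[]]
--     for _ in range(k):
--         paths = [p + [l] for p in paths for l in letters if l not in p]
--         if not paths:
--             break
--     return paths
-- ===== Notes on version B (the rewrite author's own statement) =====
-- stated objective: alternative
-- what changed: Replaces recursive backtracking with in-place path mutation by an iterative level-by-level (BFS) expansion: paths starts at [[]] and is rebuilt k times by a comprehension, stopping early once no path can be extended.
import Mathlib
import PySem

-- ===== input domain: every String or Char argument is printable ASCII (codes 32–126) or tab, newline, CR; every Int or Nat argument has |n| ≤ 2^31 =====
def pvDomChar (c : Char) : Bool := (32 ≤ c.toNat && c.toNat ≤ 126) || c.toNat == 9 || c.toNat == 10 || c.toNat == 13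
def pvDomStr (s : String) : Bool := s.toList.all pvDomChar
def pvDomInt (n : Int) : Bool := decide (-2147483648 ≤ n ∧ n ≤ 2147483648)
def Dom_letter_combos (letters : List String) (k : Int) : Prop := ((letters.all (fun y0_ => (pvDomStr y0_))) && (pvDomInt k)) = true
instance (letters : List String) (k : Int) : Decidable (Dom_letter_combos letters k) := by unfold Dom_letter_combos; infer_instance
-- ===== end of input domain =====

-- B replaces A's recursive backtracking by an iterative level-by-level expansion (alternative decomposition, same result).

-- ===== PORT A =====
-- A's recursive backtrack: the 'for ltr in letters' loop becomes recursion over the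
-- remaining letters `rem`; a recursive call backtrack(path ++ [ltr]) re-enters with
-- rem := letters.  `fuel` only makes the recursion total: a path is always duplicate-free
-- with entries from `letters`, so fuel = letters.length + 1 is never exhausted (proved below).
def btA (letters : List String) (k : Int) : Nat → List String → List String → List (List String) → List (List String)
  | 0, _, _, ans => ans
  | _ + 1, [], _, ans => ans
  | fuel + 1, ltr :: rest, path, ans =>
      if ltr ∈ path then btA letters k (fuel + 1) rest path ans
      else
        let p' := path ++ [ltr]
        let ans' := if (p'.length : Int) = k then ans ++ [p'] else btA letters k fuel letters p' ans
        btA letters k (fuel + 1) rest path ans'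

def letter_combos (letters : List String) (k : Int) : List (List String) :=
  -- backtrack([]): the top-level len(curr_path) == k check is k = 0
  if ((0 : Int) = k) then [[]] else btA letters k (letters.length + 1) letters [] []

-- ===== PORT B =====
-- one level: [p + [l] for p in paths for l in letters if l not in p]
def expandB (letters : List String) (paths : List (List String)) : List (List String) :=
  paths.flatMap (fun p => (letters.filter (fun l => l ∉ p)).map (fun l => p ++ [l]))

-- for _ in range(k): paths = expandB …; if not paths: break
def bLoop (letters : List String) : Nat → List (List String) → List (List String)
  | 0, paths => paths
  | n + 1, paths =>
      let paths' := expandB letters paths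
      if paths' = [] then paths' else bLoop letters n paths'

def letter_combos_alt (letters : List String) (k : Int) : List (List String) :=
  if k < 0 then [] else bLoop letters k.toNat [[]]

-- ===== PRECONDITION & SPEC =====
def Spec_letter_combos (letters : List String) (k : Int) (out : List (List String)) : Prop := out = letter_combos_alt letters k
instance (letters : List String) (k : Int) (out : List (List String)) : Decidable (Spec_letter_combos letters k out) := by unfold Spec_letter_combos; infer_instance

-- ===== CLAIM (what is proved, stated in full; the proofs are below) =====
def Claim_equal_letter_combos : Prop := ∀ (letters : List String) (k : Int), Dom_letter_combos letters k → Spec_letter_combos letters k (letter_combos letters k)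

-- ===== LEMMAS AND PROOFS =====

-- DFS tree of all extensions of `path` by n further distinct letters, in A's order.
def perms (letters : List String) : Nat → List String → List (List String)
  | 0, path => [path]
  | n + 1, path => (letters.filter (fun l => l ∉ path)).flatMap (fun l => perms letters n (path ++ [l]))

lemma nodup_subset_length {path letters : List String} (hnd : path.Nodup)
    (hsub : path ⊆ letters) : path.length ≤ letters.length := by
  calc path.length = path.toFinset.card := (List.toFinset_card_of_nodup hnd).symm
    _ ≤ letters.toFinset.card := Finset.card_le_card (fun x hx => by
        simp only [List.mem_toFinset] at hx ⊢; exact hsub hx)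
    _ ≤ letters.length := letters.toFinset_card_le

lemma btA_neg (letters : List String) (k : Int) (hk : k < 0) :
    ∀ fuel rem path ans, btA letters k fuel rem path ans = ans := by
  intro fuel
  induction fuel with
  | zero => intro rem path ans; simp [btA]
  | succ f ih =>
    intro rem
    induction rem with
    | nil => intro path ans; simp [btA]
    | cons ltr rest ihr =>
      intro path ans
      simp only [btA]
      by_cases h : ltr ∈ path
      · simp [h, ihr]
      · simp [h, ih, ihr, show ¬((path.length : Int) + 1 = k) from by omega]

lemma btA_main (letters : List String) (k : Int) :
    ∀ fuel path, path.Nodup → path ⊆ letters →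
      fuel + path.length = letters.length + 1 → (path.length : Int) < k →
      ∀ rem, rem ⊆ letters → ∀ ans,
      btA letters k fuel rem path ans =
        ans ++ (rem.filter (fun l => l ∉ path)).flatMap
          (fun l => perms letters (k.toNat - path.length - 1) (path ++ [l])) := by
  intro fuel
  induction fuel with
  | zero =>
    intro path hnd hsub hfuel _ _ _ _
    have := nodup_subset_length hnd hsub
    omega
  | succ f ih =>
    intro path hnd hsub hfuel hk rem
    induction rem with
    | nil => intro _ ans; simp [btA]
    | cons ltr rest ihr =>
      intro hrsub ans
      have hrest : rest ⊆ letters := fun x hx => hrsub (List.mem_cons_of_mem _ hx)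
      have hltr : ltr ∈ letters := hrsub List.mem_cons_self
      simp only [btA]
      by_cases h : ltr ∈ path
      · simpa [h] using ihr hrest ans
      · have hlen : path.length + 1 ≤ letters.length := by
          have hnd' : (ltr :: path).Nodup := List.nodup_cons.mpr ⟨h, hnd⟩
          have hsub' : (ltr :: path) ⊆ letters := fun x hx => by
            rcases List.mem_cons.mp hx with h1 | h2
            · exact h1 ▸ hltr
            · exact hsub h2
          simpa using nodup_subset_length hnd' hsub'
        have hknat : (k.toNat : Int) = k := Int.toNat_of_nonneg (by omega)
        by_cases he : (((path ++ [ltr]).length : Int) = k)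
        · -- this branch appends the completed path
          have hm : k.toNat - path.length - 1 = 0 := by
            simp at he; omega
          rw [if_neg h, if_pos he, ihr hrest (ans ++ [path ++ [ltr]])]
          simp [h, hm, perms, List.append_assoc]
        · -- recurse one level deeper
          have hnd' : (path ++ [ltr]).Nodup := by
            rw [List.nodup_append]
            exact ⟨hnd, List.nodup_singleton _, fun a ha b hb hab => h ((hab.trans (List.mem_singleton.mp hb)) ▸ ha)⟩
          have hsub' : (path ++ [ltr]) ⊆ letters := fun x hx => by
            rcases List.mem_append.mp hx with h1 | h2
            · exact hsub h1
            · simp at h2; exact h2 ▸ hltr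
          have hfuel' : f + (path ++ [ltr]).length = letters.length + 1 := by
            simp; omega
          have hk' : (((path ++ [ltr]).length : Int)) < k := by
            simp at he ⊢; omega
          have hdeep := ih (path ++ [ltr]) hnd' hsub' hfuel' hk' letters (fun _ hx => hx) ans
          have hm : k.toNat - path.length - 1 =
              (k.toNat - (path ++ [ltr]).length - 1) + 1 := by
            simp at he ⊢; omega
          rw [if_neg h, if_neg he, hdeep,
            ihr hrest (ans ++ (letters.filter (fun l => l ∉ path ++ [ltr])).flatMap
              (fun l => perms letters (k.toNat - (path ++ [ltr]).length - 1) ((path ++ [ltr]) ++ [l])))]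
          simp [h, hm, perms, List.append_assoc]

lemma expandB_flatMap_perms (letters : List String) (n : Nat) (paths : List (List String)) :
    (expandB letters paths).flatMap (perms letters n) = paths.flatMap (perms letters (n + 1)) := by
  simp only [expandB, List.flatMap_assoc]
  apply List.flatMap_congr
  intro p _
  simp [perms, List.flatMap_assoc, List.map_eq_flatMap]

lemma bLoop_eq_flatMap_perms (letters : List String) :
    ∀ n paths, bLoop letters n paths = paths.flatMap (perms letters n) := by
  intro n
  induction n with
  | zero => intro paths; simp [bLoop, perms]
  | succ m ih =>
    intro paths
    simp only [bLoop]
    by_cases h : expandB letters paths = []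
    · have : ∀ p ∈ paths, perms letters (m + 1) p = [] := by
        intro p hp
        have hfil : (letters.filter (fun l => l ∉ p)).map (fun l => p ++ [l]) = [] := by
          have := (List.flatMap_eq_nil_iff.mp h) p hp
          exact this
        have hf : letters.filter (fun l => l ∉ p) = [] := List.map_eq_nil_iff.mp hfil
        simp only [perms, hf, List.flatMap_nil]
      rw [if_pos h, h]
      exact (List.flatMap_eq_nil_iff.mpr this).symm
    · rw [if_neg h, ih, expandB_flatMap_perms]

-- ===== VERDICT (by name: the statement is the Claim_ definition above) =====
theorem letter_combos_spec : Claim_equal_letter_combos := by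
  intro letters k _
  unfold Spec_letter_combos letter_combos letter_combos_alt
  by_cases hneg : k < 0
  · have h0 : ¬ ((0 : Int) = k) := by omega
    rw [if_neg h0, if_pos hneg, btA_neg letters k hneg]
  · rw [if_neg hneg]
    by_cases h0 : (0 : Int) = k
    · have : k.toNat = 0 := by omega
      simp [if_pos h0, this, bLoop]
    · rw [if_neg h0]
      have hk0 : ((List.length ([] : List String) : Int)) < k := by simp; omega
      rw [btA_main letters k (letters.length + 1) [] List.nodup_nil
        (List.nil_subset letters) (by simp) hk0 letters (fun _ hx => hx) []]
      rw [bLoop_eq_flatMap_perms]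
      have hm : k.toNat = (k.toNat - 1) + 1 := by omega
      conv_rhs => rw [hm]
      simp [perms]
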